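-- pv_equiv track=rewrite | github.com/wjddn1029/AlgorithmStudy | yogiyo/TEST1.py | solution
-- ===== SOURCE A (Python) =====
-- def solution(stack1, stack2, stack3):
--     stack4 = stack1 + stack2 + stack3
--     stack4 = sorted(stack4, reverse=True)
--     ans = ''
--     for i in stack4:
--         if i in stack1:
--             ans += '1'
--         elif i in stack2:
--             ans += '2'
--         elif i in stack3:
--             ans += '3'
--
--     return ans
-- ===== SOURCE B (Python) =====
-- def solution(stack1, stack2, stack3):
--     merged = sorted(stack1 + stack2 + stack3, reverse=True)
--     pieces = []
--     i, n = 0, len(merged)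
--     while i < n:
--         v = merged[i]
--         j = i + 1
--         while j < n and merged[j] == v:
--             j += 1
--         if v in stack1:
--             label = '1'
--         elif v in stack2:
--             label = '2'
--         elif v in stack3:
--             label = '3'
--         else:
--             label = ''
--         pieces.append(label * (j - i))
--         i = j
--     return ''.join(pieces)
-- ===== Notes on version B (the rewrite author's own statement) =====
-- stated objective: alternative
-- what changed: B sorts once and then walks the sorted list run-by-run (one membership-labelling per run of equal values, repeating the label for the run length), instead of A's per-element loop that labels every element separately.
import Mathlib
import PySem

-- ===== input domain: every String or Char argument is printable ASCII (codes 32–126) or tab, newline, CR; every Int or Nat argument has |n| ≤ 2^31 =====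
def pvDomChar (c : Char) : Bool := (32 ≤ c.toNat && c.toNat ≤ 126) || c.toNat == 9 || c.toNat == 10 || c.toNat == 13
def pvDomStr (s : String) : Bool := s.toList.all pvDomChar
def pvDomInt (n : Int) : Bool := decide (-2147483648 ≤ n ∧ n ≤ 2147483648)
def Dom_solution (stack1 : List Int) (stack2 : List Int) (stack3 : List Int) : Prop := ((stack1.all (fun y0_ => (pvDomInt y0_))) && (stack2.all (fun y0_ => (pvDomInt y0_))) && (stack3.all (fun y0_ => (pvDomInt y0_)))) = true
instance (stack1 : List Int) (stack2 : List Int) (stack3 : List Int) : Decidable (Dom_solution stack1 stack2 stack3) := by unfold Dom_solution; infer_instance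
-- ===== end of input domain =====

-- B walks the sorted list run-by-run (one label per run of equal values, repeated for the
-- run length) instead of A's per-element labelling loop; alternative decomposition, same cost class.

-- ===== PORT A =====
def solution (stack1 : List Int) (stack2 : List Int) (stack3 : List Int) : String :=
  let stack4 := stack1 ++ stack2 ++ stack3
  let stack4 := PySem.List.sorted stack4 (fun x => x) true
  let ans := stack4.foldl (fun acc i =>
    if stack1.contains i then acc ++ ['1']
    else if stack2.contains i then acc ++ ['2']
    else if stack3.contains i then acc ++ ['3']
    else acc) ([] : List Char)
  String.ofList ans

-- ===== PORT B =====
-- label of a run's value, by the same membership priority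
def runLabel (stack1 : List Int) (stack2 : List Int) (stack3 : List Int) (v : Int) : List Char :=
  if stack1.contains v then ['1']
  else if stack2.contains v then ['2']
  else if stack3.contains v then ['3']
  else []

-- the run-by-run pass: one piece (label repeated run-length times) per maximal run of equal values
def runPieces (stack1 : List Int) (stack2 : List Int) (stack3 : List Int) : List Int → List (List Char)
  | [] => []
  | v :: rest =>
    let run := rest.takeWhile (· == v)
    (List.replicate (1 + run.length) (runLabel stack1 stack2 stack3 v)).flatten ::
      runPieces stack1 stack2 stack3 (rest.dropWhile (· == v))
termination_by l => l.length
decreasing_by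
  simpa using Nat.lt_succ_of_le (List.length_dropWhile_le _ rest)

def solution_alt (stack1 : List Int) (stack2 : List Int) (stack3 : List Int) : String :=
  let merged := PySem.List.sorted (stack1 ++ stack2 ++ stack3) (fun x => x) true
  String.ofList (runPieces stack1 stack2 stack3 merged).flatten

-- ===== PRECONDITION & SPEC =====
def Spec_solution (stack1 : List Int) (stack2 : List Int) (stack3 : List Int) (out : String) : Prop := out = solution_alt stack1 stack2 stack3
instance (stack1 : List Int) (stack2 : List Int) (stack3 : List Int) (out : String) : Decidable (Spec_solution stack1 stack2 stack3 out) := by unfold Spec_solution; infer_instance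

-- ===== CLAIM (what is proved, stated in full; the proofs are below) =====
def Claim_equal_solution : Prop := ∀ (stack1 : List Int) (stack2 : List Int) (stack3 : List Int), Dom_solution stack1 stack2 stack3 → Spec_solution stack1 stack2 stack3 (solution stack1 stack2 stack3)

-- ===== LEMMAS AND PROOFS =====

-- flatMap of the label function over a run of values all equal to v is the label repeated
theorem flatMap_takeWhile_eq (s1 s2 s3 : List Int) (v : Int) (l : List Int) :
    (l.takeWhile (· == v)).flatMap (runLabel s1 s2 s3) =
      (List.replicate (l.takeWhile (· == v)).length (runLabel s1 s2 s3 v)).flatten := by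
  induction l with
  | nil => simp
  | cons x xs ih =>
    by_cases h : x = v
    · subst h
      simp [List.replicate_succ, ih]
    · simp [h]

-- per-element labelling equals the run-by-run pass, for ANY list
theorem flatMap_eq_runPieces_aux (s1 s2 s3 : List Int) :
    ∀ (n : Nat) (l : List Int), l.length ≤ n →
      l.flatMap (runLabel s1 s2 s3) = (runPieces s1 s2 s3 l).flatten := by
  intro n
  induction n with
  | zero =>
    intro l hl
    rw [List.length_eq_zero_iff.mp (Nat.le_zero.mp hl)]
    simp [runPieces]
  | succ n ih =>
    intro l hl
    match l with
    | [] => simp [runPieces]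
    | v :: rest =>
    have ihr := ih (rest.dropWhile (· == v))
      (le_trans (List.length_dropWhile_le _ rest) (by simpa using hl))
    rw [runPieces]
    have hsplit : rest = rest.takeWhile (· == v) ++ rest.dropWhile (· == v) :=
      (List.takeWhile_append_dropWhile).symm
    conv_lhs => rw [show v :: rest = v :: (rest.takeWhile (· == v) ++ rest.dropWhile (· == v)) from by rw [← hsplit]]
    simp only [List.flatMap_cons, List.flatMap_append, flatMap_takeWhile_eq, ihr,
      List.flatten_cons]
    rw [Nat.add_comm, List.replicate_succ]
    simp [List.append_assoc]

-- A's foldl is the flatMap of the label function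
theorem flatMap_eq_runPieces (s1 s2 s3 : List Int) (l : List Int) :
    l.flatMap (runLabel s1 s2 s3) = (runPieces s1 s2 s3 l).flatten :=
  flatMap_eq_runPieces_aux s1 s2 s3 l.length l (le_refl _)

theorem foldl_eq_flatMap (s1 s2 s3 : List Int) (l : List Int) (acc : List Char) :
    l.foldl (fun acc i =>
      if s1.contains i then acc ++ ['1']
      else if s2.contains i then acc ++ ['2']
      else if s3.contains i then acc ++ ['3']
      else acc) acc = acc ++ l.flatMap (runLabel s1 s2 s3) := by
  induction l generalizing acc with
  | nil => simp
  | cons x xs ih =>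
    simp only [List.foldl_cons, List.flatMap_cons, ih, runLabel]
    split_ifs <;> simp

-- ===== VERDICT (by name: the statement is the Claim_ definition above) =====
theorem solution_spec : Claim_equal_solution := by
  intro s1 s2 s3 _
  show _ = _
  unfold solution solution_alt
  simp only [foldl_eq_flatMap, List.nil_append, flatMap_eq_runPieces]
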